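-- pv_equiv track=rewrite | github.com/drewp/qtofnotebook | formserver.py | filledOutputRow
-- ===== SOURCE A (Python) =====
-- def filledOutputRow(headings, row):
--     """
--     Return a row list for the given row dict. headings will be
--     extended if necessary.
--     """
--     positionedRow = [None] * len(headings)
--     for k, v in sorted(row.items()):
--         try:
--             column = headings.index(k)
--         except ValueError:
--             headings.append(k)
--             positionedRow.append(None)
--             column = headings.index(k)
--         positionedRow[column] = v
--     return positionedRow
-- ===== SOURCE B (Python) =====
-- def filledOutputRow(headings, row):
--     """
--     Return a row list for the given row dict. headings will be
--     extended if necessary (same mutation as the original).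
--     """
--     items = sorted(row.items())
--     # pass 1: finalise the heading schema
--     for k, _ in items:
--         if k not in headings:
--             headings.append(k)
--     # pass 2: allocate once at final length, then place values
--     positionedRow = [None] * len(headings)
--     for k, v in items:
--         positionedRow[headings.index(k)] = v
--     return positionedRow
-- ===== Notes on version B (the rewrite author's own statement) =====
-- stated objective: alternative
-- what changed: A interleaves schema discovery with placement in one try/except loop that grows the output list as it goes; B splits it into two passes: first finalise the heading schema, then allocate the output once at its final length and place every value with a single headings.index per key.
import Mathlib
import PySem

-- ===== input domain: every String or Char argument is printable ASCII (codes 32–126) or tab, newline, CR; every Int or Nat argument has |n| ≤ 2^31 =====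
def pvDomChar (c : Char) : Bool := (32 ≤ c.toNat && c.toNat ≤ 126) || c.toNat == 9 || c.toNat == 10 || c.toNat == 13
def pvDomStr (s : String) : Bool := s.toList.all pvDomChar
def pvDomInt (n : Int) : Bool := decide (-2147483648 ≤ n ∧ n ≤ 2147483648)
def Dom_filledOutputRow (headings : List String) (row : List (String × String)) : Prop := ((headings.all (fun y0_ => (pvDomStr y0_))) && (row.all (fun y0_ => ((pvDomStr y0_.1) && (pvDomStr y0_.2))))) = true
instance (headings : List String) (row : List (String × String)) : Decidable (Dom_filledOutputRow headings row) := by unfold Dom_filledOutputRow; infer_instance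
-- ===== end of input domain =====

-- B replaces A's single interleaved try/except loop by two passes (finalise the heading
-- schema first, then allocate once and place by headings.index); return-value equivalence
-- proved, and both implementations extend `headings` the same way (a mutation in Python).


-- ===== PORT A =====
-- A's loop body: look up k; on ValueError append k (and a None slot), index is then the
-- old length; finally positionedRow[column] = v.
def stepA (s : List String × List (Option String)) (kv : String × String) :
    List String × List (Option String) :=
  match PySem.List.index? s.1 kv.1 with
  | some c => (s.1, s.2.set c (some kv.2))
  | none   => (s.1 ++ [kv.1], (s.2 ++ [none]).set s.1.length (some kv.2))

def filledOutputRow (headings : List String) (row : List (String × String)) : List (Option String) :=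
  (( PySem.List.sorted2 (PySem.Dict.ofList row).items Prod.fst Prod.snd ).foldl stepA
      (headings, List.replicate headings.length (none : Option String))).2

-- ===== PORT B =====
-- pass 1: if k not in headings: headings.append(k)
def stepExt (H : List String) (kv : String × String) : List String :=
  if kv.1 ∈ H then H else H ++ [kv.1]

-- pass 2: positionedRow[headings.index(k)] = v  (the index always exists after pass 1;
-- Python would raise ValueError on the unreachable none branch, where we return P unchanged)
def stepPlace (ext : List String) (P : List (Option String)) (kv : String × String) :
    List (Option String) :=
  match PySem.List.index? ext kv.1 with
  | some c => P.set c (some kv.2)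
  | none   => P

def filledOutputRow_alt (headings : List String) (row : List (String × String)) : List (Option String) :=
  let items := PySem.List.sorted2 (PySem.Dict.ofList row).items Prod.fst Prod.snd
  let ext := items.foldl stepExt headings
  items.foldl (stepPlace ext) (List.replicate ext.length (none : Option String))

-- ===== PRECONDITION & SPEC =====
def Spec_filledOutputRow (headings : List String) (row : List (String × String)) (out : List (Option String)) : Prop := out = filledOutputRow_alt headings row
instance (headings : List String) (row : List (String × String)) (out : List (Option String)) : Decidable (Spec_filledOutputRow headings row out) := by unfold Spec_filledOutputRow; infer_instance

-- ===== CLAIM (what is proved, stated in full; the proofs are below) =====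
def Claim_equal_filledOutputRow : Prop := ∀ (headings : List String) (row : List (String × String)), Dom_filledOutputRow headings row → Spec_filledOutputRow headings row (filledOutputRow headings row)

-- ===== LEMMAS AND PROOFS =====

-- pass 1 only appends: its result extends its start
theorem ext_prefix (L : List (String × String)) (H : List String) :
    ∃ r, L.foldl stepExt H = H ++ r := by
  induction L generalizing H with
  | nil => exact ⟨[], by simp⟩
  | cons kv L ih =>
    simp only [List.foldl_cons, stepExt]
    split
    · exact ih H
    · obtain ⟨r, hr⟩ := ih (H ++ [kv.1])
      exact ⟨kv.1 :: r, by simpa using hr⟩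

-- main invariant: A's fused fold equals B's placement pass over the final schema,
-- on a state padded with None up to the final length
theorem main_inv (L : List (String × String)) (H : List String) (P : List (Option String))
    (hlen : P.length = H.length) :
    (L.foldl stepA (H, P)).2 =
      L.foldl (stepPlace (L.foldl stepExt H))
        (P ++ List.replicate ((L.foldl stepExt H).length - H.length) (none : Option String)) := by
  induction L generalizing H P with
  | nil => simp
  | cons kv L ih =>
    simp only [List.foldl_cons]
    by_cases hk : kv.1 ∈ H
    · -- the key is already a heading
      obtain ⟨c, hc⟩ := Option.isSome_iff_exists.mp ((PySem.List.index?_isSome_iff H kv.1).mpr hk)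
      obtain ⟨hclt, -, -⟩ := PySem.List.getElem_of_index?_eq_some hc
      have hstepE : stepExt H kv = H := by simp [stepExt, hk]
      have hstepA : stepA (H, P) kv = (H, P.set c (some kv.2)) := by
        simp only [stepA, hc]
      rw [hstepE, hstepA, ih H (P.set c (some kv.2)) (by simpa using hlen)]
      obtain ⟨r, hr⟩ := ext_prefix L H
      have hidx : PySem.List.index? (L.foldl stepExt H) kv.1 = some c := by
        rw [hr, PySem.List.index?_append_of_mem r hk, hc]
      have hset : (P ++ List.replicate ((L.foldl stepExt H).length - H.length) (none : Option String)).set c (some kv.2)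
          = P.set c (some kv.2) ++ List.replicate ((L.foldl stepExt H).length - H.length) (none : Option String) := by
        rw [List.set_append]
        simp [hlen ▸ hclt]
      rw [stepPlace, hidx]
      simp only [hset]
    · -- new key: A appends it; in B it sits at position |H| of the final schema
      have hidxH : PySem.List.index? H kv.1 = none := (PySem.List.index?_eq_none_iff H kv.1).mpr hk
      have hstepE : stepExt H kv = H ++ [kv.1] := by simp [stepExt, hk]
      have hPset : (P ++ [(none : Option String)]).set H.length (some kv.2) = P ++ [some kv.2] := by
        rw [List.set_append]
        simp [hlen]
      have hstepA : stepA (H, P) kv = (H ++ [kv.1], P ++ [some kv.2]) := by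
        simp only [stepA, hidxH, hPset]
      rw [hstepE, hstepA, ih (H ++ [kv.1]) (P ++ [some kv.2]) (by simp [hlen])]
      obtain ⟨r, hr⟩ := ext_prefix L (H ++ [kv.1])
      have hidx : PySem.List.index? (L.foldl stepExt (H ++ [kv.1])) kv.1 = some H.length := by
        rw [hr, PySem.List.index?_append_of_mem r (by simp),
          PySem.List.index?_append_singleton_self H kv.1 hk]
      have hlenE : H.length + 1 ≤ (L.foldl stepExt (H ++ [kv.1])).length := by
        rw [hr]; simp
      rw [stepPlace, hidx]
      have hpad : (L.foldl stepExt (H ++ [kv.1])).length - H.length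
          = ((L.foldl stepExt (H ++ [kv.1])).length - (H ++ [kv.1]).length) + 1 := by
        simp; omega
      have hset : (P ++ List.replicate ((L.foldl stepExt (H ++ [kv.1])).length - H.length) (none : Option String)).set H.length (some kv.2)
          = (P ++ [some kv.2]) ++ List.replicate ((L.foldl stepExt (H ++ [kv.1])).length - (H ++ [kv.1]).length) (none : Option String) := by
        rw [hpad, List.replicate_succ, List.set_append]
        simp [hlen]
      simp only [hset]

-- ===== VERDICT (by name: the statement is the Claim_ definition above) =====
theorem filledOutputRow_spec : Claim_equal_filledOutputRow := by
  intro headings row _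
  unfold Spec_filledOutputRow filledOutputRow filledOutputRow_alt
  set L := PySem.List.sorted2 (PySem.Dict.ofList row).items Prod.fst Prod.snd with hL
  obtain ⟨r, hr⟩ := ext_prefix L headings
  rw [main_inv L headings _ (by simp)]
  congr 1
  rw [hr]
  simp [List.replicate_append_replicate]
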